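-- pv_equiv track=rewrite | github.com/yunyu2019/blog | python/python_challenge/32/32.py | fillinit
-- ===== SOURCE A (Python) =====
-- def candidata(data,maxlen):
--     """得到所有可能的排序列表"""
--     candi=[]
--     length=len(data)
--     num=maxlen-(length-1)-sum(data) #空格数量
--     for i in range(num+1):
--         cans = 'O'*i + '#'*data[0]
--         if length==1:
--             tail = 'O'*(maxlen-len(cans))
--             candi.append(cans+tail)
--         else:
--             tail = ['O'+j for j in candidata(data[1:], maxlen-len(cans)-1)]
--             candi.extend([cans + j for j in tail])
--     return candi
--
-- def fillinit(w,h,hdata,vdata):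
--     """初始化所有可能的排序集合"""
--     posbH = []
--     posbV = []
--     for i in range(h):
--         posbH.append(candidata(hdata[i],w))
--     for i in range(w):
--         posbV.append(candidata(vdata[i],h))
--     return posbH, posbV
-- ===== SOURCE B (Python) =====
-- def _combos(lo, n, k):
--     """All sorted k-subsets of range(lo, n), in lexicographic order."""
--     if k == 0:
--         return [[]]
--     return [[c0] + rest
--             for c0 in range(lo, n - k + 1)
--             for rest in _combos(c0 + 1, n, k - 1)]
--
-- def _cands(data, maxlen):
--     """All placements of blocks `data` in width `maxlen`, via stars-and-bars:
--     a size-k subset c of range(num+k) encodes the gap sizes before each block."""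
--     k = len(data)
--     num = maxlen - (k - 1) - sum(data)
--     res = []
--     for c in _combos(0, num + k, k):
--         s = 'O' * c[0] + '#' * data[0]
--         prev = c[0]
--         for cj, b in zip(c[1:], data[1:]):
--             s += 'O' * (cj - prev) + '#' * b
--             prev = cj
--         s += 'O' * (num + k - 1 - prev)
--         res.append(s)
--     return res
--
-- def fillinit(w, h, hdata, vdata):
--     return ([_cands(hdata[i], w) for i in range(h)],
--             [_cands(vdata[i], h) for i in range(w)])
-- ===== Notes on version B (the rewrite author's own statement) =====
-- stated objective: alternative
-- what changed: candidata's string-building recursion (prefix + recurse on the remaining width) is replaced by a stars-and-bars enumeration: each arrangement corresponds to a sorted k-subset of range(num+k) encoding the gap sizes, generated in the same lexicographic order, and each string is assembled in one pass from its subset.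
-- outside the precondition, e.g. on fillinit(0, 1, [[-1]], []): A returns ([['', 'O']], []), B returns ([['O', 'O']], [])
import Mathlib
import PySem

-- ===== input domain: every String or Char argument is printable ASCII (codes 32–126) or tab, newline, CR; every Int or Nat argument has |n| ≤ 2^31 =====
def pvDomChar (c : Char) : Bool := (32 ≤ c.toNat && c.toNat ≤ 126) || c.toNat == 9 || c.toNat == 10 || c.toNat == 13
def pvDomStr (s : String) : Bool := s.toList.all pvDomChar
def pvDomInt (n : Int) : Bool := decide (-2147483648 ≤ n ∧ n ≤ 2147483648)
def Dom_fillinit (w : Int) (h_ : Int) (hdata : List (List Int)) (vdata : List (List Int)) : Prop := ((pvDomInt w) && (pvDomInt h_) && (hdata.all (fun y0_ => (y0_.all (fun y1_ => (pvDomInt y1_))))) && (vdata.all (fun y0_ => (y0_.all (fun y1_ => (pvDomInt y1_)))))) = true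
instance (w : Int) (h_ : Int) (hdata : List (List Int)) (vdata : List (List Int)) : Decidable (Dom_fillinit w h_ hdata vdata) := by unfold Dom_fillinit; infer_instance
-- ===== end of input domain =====

-- B replaces candidata's string-building recursion by a stars-and-bars enumeration:
-- a k-subset of range(num+k) encodes the gap sizes, strings are assembled per subset (objective: alternative).

-- Python "c * n" (empty for n ≤ 0)
def rep (n : Int) (c : Char) : List Char := List.replicate n.toNat c

-- ===== PORT A =====
def candA : List Int → Int → List (List Char)
  | [], _ => []   -- Python raises IndexError on data[0]; excluded by Pre_
  | d0 :: rest, maxlen =>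
    let num := maxlen - (((d0 :: rest).length : Int) - 1) - (d0 :: rest).sum
    (PySem.List.pyRange 0 (num + 1) 1).foldl (fun candi i =>
      let cans := rep i 'O' ++ rep d0 '#'
      if rest.isEmpty then
        candi ++ [cans ++ rep (maxlen - (cans.length : Int)) 'O']
      else
        candi ++ ((candA rest (maxlen - (cans.length : Int) - 1)).map
                    (fun j => 'O' :: j)).map (fun j => cans ++ j)) []
termination_by data => data.length

def candAStr (data : List Int) (maxlen : Int) : List String :=
  (candA data maxlen).map String.mk

def fillinit (w : Int) (h_ : Int) (hdata : List (List Int)) (vdata : List (List Int)) : List (List String) × List (List String) :=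
  let posbH := (PySem.List.pyRange 0 h_ 1).foldl
      (fun acc i => acc ++ [candAStr ((PySem.List.pyGet? hdata i).getD []) w]) []
  let posbV := (PySem.List.pyRange 0 w 1).foldl
      (fun acc i => acc ++ [candAStr ((PySem.List.pyGet? vdata i).getD []) h_]) []
  (posbH, posbV)

-- ===== PORT B =====
-- all sorted k-subsets of range(lo, n), lexicographic
def combosB : Int → Int → Nat → List (List Int)
  | _, _, 0 => [[]]
  | lo, n, k + 1 =>
    (PySem.List.pyRange lo (n - ((k : Int) + 1) + 1) 1).flatMap
      (fun c0 => (combosB (c0 + 1) n k).map (fun rest => c0 :: rest))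

-- body of Source B's inner loop: append gap then block, remember the subset element
def bstep (sp : List Char × Int) (p : Int × Int) : List Char × Int :=
  (sp.1 ++ rep (p.1 - sp.2) 'O' ++ rep p.2 '#', p.1)

def buildB (data : List Int) (num : Int) (k : Nat) (c : List Int) : List Char :=
  match data, c with
  | d0 :: drest, c0 :: crest =>
    let sp := (crest.zip drest).foldl bstep (rep c0 'O' ++ rep d0 '#', c0)
    sp.1 ++ rep (num + (k : Int) - 1 - sp.2) 'O'
  | _, _ => []   -- Python raises IndexError on c[0]/data[0]; excluded by Pre_

def candB (data : List Int) (maxlen : Int) : List (List Char) :=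
  let k := data.length
  let num := maxlen - ((k : Int) - 1) - data.sum
  (combosB 0 (num + (k : Int)) k).map (buildB data num k)

def candBStr (data : List Int) (maxlen : Int) : List String :=
  (candB data maxlen).map String.mk

def fillinit_alt (w : Int) (h_ : Int) (hdata : List (List Int)) (vdata : List (List Int)) : List (List String) × List (List String) :=
  ((PySem.List.pyRange 0 h_ 1).map (fun i => candBStr ((PySem.List.pyGet? hdata i).getD []) w),
   (PySem.List.pyRange 0 w 1).map (fun i => candBStr ((PySem.List.pyGet? vdata i).getD []) h_))

-- ===== PRECONDITION & SPEC =====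
-- Pre_ excludes (a) indices where A raises IndexError (h > len(hdata), w > len(vdata), or an
-- empty clue list) and (b) clue lists with negative block sizes, outside the nonogram domain,
-- where A's strings are an artefact of Python's '#'*negative == ''.
def Pre_fillinit (w : Int) (h_ : Int) (hdata : List (List Int)) (vdata : List (List Int)) : Prop :=
  h_ ≤ (hdata.length : Int) ∧ w ≤ (vdata.length : Int) ∧
  (∀ l ∈ hdata.take h_.toNat, l ≠ [] ∧ ∀ x ∈ l, 0 ≤ x) ∧
  (∀ l ∈ vdata.take w.toNat, l ≠ [] ∧ ∀ x ∈ l, 0 ≤ x)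
instance (w : Int) (h_ : Int) (hdata : List (List Int)) (vdata : List (List Int)) : Decidable (Pre_fillinit w h_ hdata vdata) := by unfold Pre_fillinit; infer_instance

def pvWitness_fillinit : Int × Int × List (List Int) × List (List Int) :=
  (2, 1, [[1]], [[1], [1]])

def Spec_fillinit (w : Int) (h_ : Int) (hdata : List (List Int)) (vdata : List (List Int)) (out : List (List String) × List (List String)) : Prop := out = fillinit_alt w h_ hdata vdata
instance (w : Int) (h_ : Int) (hdata : List (List Int)) (vdata : List (List Int)) (out : List (List String) × List (List String)) : Decidable (Spec_fillinit w h_ hdata vdata out) := by unfold Spec_fillinit; infer_instance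

-- ===== CLAIM (what is proved, stated in full; the proofs are below) =====
def Claim_equal_fillinit : Prop := ∀ (w : Int) (h_ : Int) (hdata : List (List Int)) (vdata : List (List Int)), Dom_fillinit w h_ hdata vdata → Pre_fillinit w h_ hdata vdata → Spec_fillinit w h_ hdata vdata (fillinit w h_ hdata vdata)

-- ===== LEMMAS AND PROOFS =====
theorem fold_pre (l : List (Int × Int)) (a s : List Char) (prev : Int) :
    l.foldl bstep (a ++ s, prev) =
      (a ++ (l.foldl bstep (s, prev)).1, (l.foldl bstep (s, prev)).2) := by
  induction l generalizing s prev with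
  | nil => simp
  | cons p t ih =>
    simp only [List.foldl_cons, bstep, List.append_assoc]
    exact ih _ _

theorem fold_shift (l : List (Int × Int)) (s : List Char) (prev t : Int) :
    (l.map (fun p => (p.1 + t, p.2))).foldl bstep (s, prev + t) =
      ((l.foldl bstep (s, prev)).1, (l.foldl bstep (s, prev)).2 + t) := by
  induction l generalizing s prev with
  | nil => simp
  | cons p tl ih =>
    simp only [List.map_cons, List.foldl_cons, bstep]
    have : p.1 + t - (prev + t) = p.1 - prev := by ring
    rw [this]
    exact ih _ _

theorem combos_len_mem : ∀ (k : Nat) (lo n : Int) (c : List Int),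
    c ∈ combosB lo n k → c.length = k ∧ ∀ x ∈ c, lo ≤ x := by
  intro k
  induction k with
  | zero => intro lo n c hc; simp [combosB] at hc; simp [hc]
  | succ k ih =>
    intro lo n c hc
    simp only [combosB, List.mem_flatMap, List.mem_map] at hc
    obtain ⟨c0, hc0, rest, hrest, rfl⟩ := hc
    have h0 : lo ≤ c0 ∧ c0 < n - (k+1) + 1 := (PySem.List.mem_pyRange_one).1 hc0
    obtain ⟨hlen, hmem⟩ := ih (c0+1) n rest hrest
    refine ⟨by simp [hlen], ?_⟩
    intro x hx
    rcases List.mem_cons.1 hx with rfl | hx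
    · exact h0.1
    · have := hmem x hx; omega

theorem combos_shift : ∀ (k : Nat) (lo n t : Int),
    combosB (lo + t) (n + t) k = (combosB lo n k).map (List.map (· + t)) := by
  intro k
  induction k with
  | zero => intro lo n t; simp [combosB]
  | succ k ih =>
    intro lo n t
    simp only [combosB]
    have hr : PySem.List.pyRange (lo + t) (n + t - ((k:Int)+1) + 1) 1
        = (PySem.List.pyRange lo (n - ((k:Int)+1) + 1) 1).map (· + t) := by
      rw [PySem.List.pyRange_one, PySem.List.pyRange_one]
      have : (n + t - ((k:Int)+1) + 1 - (lo + t)) = (n - ((k:Int)+1) + 1 - lo) := by ring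
      rw [this]
      simp only [List.map_map]
      apply List.map_congr_left
      intro a _; simp; ring
    rw [hr, List.flatMap_map, List.map_flatMap]
    apply List.flatMap_congr
    intro c0 _
    have e : c0 + t + 1 = c0 + 1 + t := by ring
    rw [e, ih (c0 + 1) n t, List.map_map, List.map_map]
    apply List.map_congr_left
    intro rest _
    simp

theorem zip_map_shift (l : List Int) (l2 : List Int) (t : Int) :
    (l.map (· + t)).zip l2 = (l.zip l2).map (fun p => (p.1 + t, p.2)) := by
  rw [List.zip_map_left]
  apply List.map_congr_left
  intro p _
  rfl

theorem buildB_cons (d0 r0 : Int) (rrest : List Int) (num c0 c0' : Int) (ctail : List Int)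
    (kk : Nat) (h0 : 0 ≤ c0') :
    buildB (d0 :: r0 :: rrest) num (kk + 1) (c0 :: (c0' :: ctail).map (· + (c0 + 1)))
      = rep c0 'O' ++ rep d0 '#' ++ 'O' :: buildB (r0 :: rrest) (num - c0) kk (c0' :: ctail) := by
  have hrep : rep (c0' + (c0 + 1) - c0) 'O' = 'O' :: rep c0' 'O' := by
    have h1 : (c0' + (c0 + 1) - c0).toNat = c0'.toNat + 1 := by omega
    simp [rep, h1, List.replicate_succ]
  simp only [buildB, List.map_cons, List.zip_cons_cons, List.foldl_cons]
  rw [zip_map_shift]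
  show (((ctail.zip rrest).map fun p => (p.1 + (c0+1), p.2)).foldl bstep
      (bstep (rep c0 'O' ++ rep d0 '#', c0) (c0' + (c0 + 1), r0))).1 ++ _ = _
  simp only [bstep, hrep]
  rw [show (rep c0 'O' ++ rep d0 '#' ++ ('O' :: rep c0' 'O') ++ rep r0 '#', c0' + (c0 + 1))
      = ((rep c0 'O' ++ rep d0 '#' ++ ['O']) ++ (rep c0' 'O' ++ rep r0 '#'), c0' + (c0 + 1)) by
    simp]
  rw [fold_shift, fold_pre]
  simp only [List.append_assoc, List.cons_append, List.nil_append]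
  have : num + ↑(kk + 1) - 1 - (((ctail.zip rrest).foldl bstep (rep c0' 'O' ++ rep r0 '#', c0')).2
       + (c0 + 1)) = num - c0 + ↑kk - 1 - ((ctail.zip rrest).foldl bstep (rep c0' 'O' ++ rep r0 '#', c0')).2 := by
    push_cast; ring
  rw [this]

theorem rep_len (n : Int) (hn : 0 ≤ n) (c : Char) : ((rep n c).length : Int) = n := by
  simp [rep]; omega

theorem candAB : ∀ (data : List Int), (∀ x ∈ data, 0 ≤ x) → data ≠ [] →
    ∀ maxlen, candA data maxlen = candB data maxlen := by
  intro data
  induction data with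
  | nil => intro _ h; exact absurd rfl h
  | cons d0 rest ih =>
    intro hpos _ maxlen
    have hd0 : 0 ≤ d0 := hpos d0 (by simp)
    match rest with
    | [] =>
      simp only [candA, candB, List.isEmpty_nil, if_true]
      simp only [List.length_cons, List.length_nil, List.sum_cons, List.sum_nil]
      norm_num
      have hcomb : combosB 0 (maxlen - d0 + 1) 1
          = (PySem.List.pyRange 0 (maxlen - d0 + 1) 1).map (fun c0 => [c0]) := by
        show combosB 0 (maxlen - d0 + 1) (0 + 1) = _
        simp only [combosB, Nat.cast_zero]
        rw [show maxlen - d0 + 1 - ((0:Int) + 1) + 1 = maxlen - d0 + 1 by ring]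
        simp only [List.map_cons, List.map_nil]
        exact (List.map_eq_flatMap).symm
      rw [← List.flatMap_def, ← List.map_eq_flatMap, hcomb, List.map_map,
        PySem.List.pyRange_one, List.map_map, List.map_map]
      apply List.map_congr_left
      intro k _
      simp only [Function.comp_apply, buildB, List.zip_nil_right, List.foldl_nil]
      have h1 : ((rep (0 + (k:Int)) 'O').length : Int) = 0 + (k:Int) := rep_len _ (by omega) _
      have h2 : ((rep d0 '#').length : Int) = d0 := rep_len _ hd0 _
      rw [h1, h2]
      rw [show maxlen - (0 + (k:Int) + d0) = maxlen - d0 + ((1:Nat):Int) - 1 - (0 + (k:Int)) by push_cast; ring]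
      simp [List.append_assoc]
    | r0 :: rrest =>
      have hrne : r0 :: rrest ≠ [] := by simp
      have hrpos : ∀ x ∈ r0 :: rrest, 0 ≤ x := fun x hx => hpos x (List.mem_cons_of_mem _ hx)
      conv_lhs => rw [candA]
      conv_rhs => rw [candB]
      simp only [List.isEmpty_cons, Bool.false_eq_true, if_false, List.length_cons,
        List.sum_cons, PySem.List.foldl_append_eq_flatMap, List.nil_append]
      push_cast
      set K := rrest.length with hK
      set num := maxlen - ((K:Int) + 1 + 1 - 1) - (d0 + (r0 + rrest.sum)) with hnum
      have hcombo : combosB 0 (num + ((K:Int) + 1 + 1)) (K + 1 + 1)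
          = (PySem.List.pyRange 0 (num + 1) 1).flatMap
              (fun c0 => (combosB (c0 + 1) (num + ((K:Int) + 1 + 1)) (K + 1)).map (fun r => c0 :: r)) := by
        simp only [combosB]
        rw [show num + ((K:Int) + 1 + 1) - ((K + 1 : Nat) + 1) + 1 = num + 1 by push_cast; ring]
      rw [hcombo, List.map_flatMap, PySem.List.pyRange_one, List.flatMap_map, List.flatMap_map]
      apply List.flatMap_congr
      intro k _
      rw [show (0:Int) + (k:Int) = (k:Int) by ring]
      have hlen : (((rep ((k:Int)) 'O' ++ rep d0 '#').length) : Int) = (k:Int) + d0 := by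
        simp [rep]; omega
      rw [hlen]
      rw [ih hrpos hrne (maxlen - ((k:Int) + d0) - 1), candB]
      simp only [List.length_cons, List.sum_cons]
      push_cast
      set num' := maxlen - ((k:Int) + d0) - 1 - ((K:Int) + 1 - 1) - (r0 + rrest.sum) with hnum'
      have hsh : combosB ((k:Int) + 1) (num + ((K:Int) + 1 + 1)) (K + 1)
          = (combosB 0 (num' + ((K:Int) + 1)) (K + 1)).map (List.map (· + ((k:Int) + 1))) := by
        have := combos_shift (K + 1) 0 (num' + ((K:Int) + 1)) ((k:Int) + 1)
        rw [show (0:Int) + ((k:Int) + 1) = (k:Int) + 1 by ring] at this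
        rw [show num' + ((K:Int) + 1) + ((k:Int) + 1) = num + ((K:Int) + 1 + 1) by
          rw [hnum', hnum]; ring] at this
        exact this
      rw [hsh]
      simp only [List.map_map, hK]
      apply List.map_congr_left
      intro c' hc'
      obtain ⟨hclen, hcnn⟩ := combos_len_mem _ _ _ _ hc'
      match c', hclen with
      | c0' :: ctail, _ =>
        have h0 : 0 ≤ c0' := hcnn c0' (by simp)
        simp only [Function.comp_apply]
        rw [buildB_cons d0 r0 rrest num ((k:Int)) c0' ctail (K + 1) h0]
        rw [show num - (k:Int) = num' by rw [hnum', hnum]; ring]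

theorem rowsAB (data : List (List Int)) (n len_ : Int) (hn : n ≤ (data.length : Int))
    (hok : ∀ l ∈ data.take n.toNat, l ≠ [] ∧ ∀ x ∈ l, 0 ≤ x) :
    (PySem.List.pyRange 0 n 1).foldl
        (fun acc i => acc ++ [candAStr ((PySem.List.pyGet? data i).getD []) len_]) [] =
      (PySem.List.pyRange 0 n 1).map
        (fun i => candBStr ((PySem.List.pyGet? data i).getD []) len_) := by
  rw [PySem.List.foldl_append_singleton_eq_map, List.nil_append]
  apply List.map_congr_left
  intro i hi
  obtain ⟨hi0, hin⟩ := (PySem.List.mem_pyRange_one).1 hi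
  have hilen : i < (data.length : Int) := lt_of_lt_of_le hin hn
  rw [PySem.List.pyGet?_eq_some_getElem data hi0 hilen, Option.getD_some]
  have htk : i.toNat < n.toNat := by omega
  have htk2 : i.toNat < (data.take n.toNat).length := by
    simp [List.length_take]; omega
  have hmem : data[i.toNat] ∈ data.take n.toNat := by
    have := List.getElem_mem htk2
    rwa [List.getElem_take] at this
  obtain ⟨hne, hnn⟩ := hok _ hmem
  unfold candAStr candBStr
  rw [candAB _ hnn hne len_]

-- ===== VERDICT (by name: the statement is the Claim_ definition above) =====
theorem fillinit_spec : Claim_equal_fillinit := by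
  unfold Claim_equal_fillinit
  intro w h_ hdata vdata _ hpre
  obtain ⟨hh, hw, hH, hV⟩ := hpre
  unfold Spec_fillinit fillinit fillinit_alt
  rw [rowsAB hdata h_ w hh hH, rowsAB vdata w h_ hw hV]
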